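/-
  THE SSE RULES IN THE STEPPER: `u_step` / `u_step_at` / `u_step_code` step the 51 SSE forms of the image.

  UserX/Sse.lean has one proved rule per family of SSE bodies, `… → Q () u' → wpUser L μ (body as decoded) Q E u`. This file
  registers them at the stepper's extension point `u_ext_rule` (UserX/Tac.lean): `u_body` tries the rule on the body as decoded,
  then normalises every goal the rule leaves with the stepping set and the caller's facts.

      u_sse_rule        the dispatcher: looks at the HEAD of the decoded body (`Insn.MOVSS.loadBody`, `Insn.ADDSD.addsd` …), unfolds
                        the mnemonic's wrapper when there is one, applies the family rule, discharges the rule's hypotheses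
      u_sse_side        what becomes of each hypothesis of a rule (by its shape):
                            Legacy e            closed: `⟨rfl, rfl, rfl⟩` on the decoded encoding literal
                            SseMicro μ          closed from `hμ : UserX.MicroOK μ` (or `SseMicro μ`) of the context   else goal side_micro
                            SseOK u'            closed from `hs : SseOK u` of the context, through the setters      else goal side_sseok
                            FlagsOK u'.flags    closed by the stepper's `u_flagsok_state` (COMIS*)                   else goal side_flagsok
                            L.Has (u'.ea a) n   goal side_has: one per memory operand (closed when it is a hypothesis)
                            (u'.ea a).aligned 16 = true     goal side_align: XORPS / XORPD `xmm, m128` (closed when it evaluates)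
                            ∀ …, Q () u''       the continuation: the universally quantified OPAQUE values are introduced as
                                                `mx1 : Word` (the new MXCSR) with `hmx1 : mx1 &&& 0x1F80 = 0x1F80`, `x1 : Vec` /
                                                `x1 : BitVec n` (a new register value, the bytes stored), `cmp1 : FP.Cmp` (a compare)

  OPAQUE BY DEFAULT, EXACT ON REQUEST. The safety proof never looks at a floating-point value (STRATEGY §4), so by default a
  step leaves the new vector register, the stored bytes, a converted integer and the outcome of a compare as fresh variables:
  the state term stays small and no `FP.*` term ever appears. The one place where the VALUE matters — the 16-byte struct copy
  `movdqu xmm0, [rbp]; movups [rbx+0x70], xmm0` of `vorbis_init` — is stepped with the exact rules: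

      u_exact_sse (u_step_code h 5 hrip [facts])            = set_option userx.sseExact true in …

  THE NORMAL FORM with the two SSE setters (`u_norm`; UserX/Step.lean has the integer part):

      (((((u.setReg r₁ x₁ … ).writeVecLow .v128 v₁ y₁ … ).setMxcsr w).setMem μ).setFlags f).setRip a        r₁ < r₂ < …, v₁ < v₂ < …

  `SseOK` AFTER A STEP is not a new hypothesis: the state is a nest of setters over the base state `u`, `hs : SseOK u` (and the
  `hmx1` facts of the MXCSR values introduced on the way) stay in the context, and `u_sseok` reads MXCSR through the nest
  (`SseOK.keep_setReg` … `SseOK.keep_writeVecLow`, `SseOK.of_setMxcsr` are the lemmas, for a proof that wants them by hand).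

  `u_sse_tidy` (registered at `u_ext_tidy`, the end of `u_body`) clears the opaque values that nothing mentions any more (a
  register that was overwritten, an MXCSR value that was replaced); it is `u_clear_stale [x1, cmp1, mx1, hmx1]`, and
  `u_clear_stale [names]` does the same for the variables a contract introduces at every use.

  ALSO HERE, because the SSE side conditions need them: `State.ea_eq` (the effective address of a decoded operand written out,
  in the stepping set: a side condition comes out as `L.Has (rsp + 8) 4`), `reduceAligned` (the alignment of a literal address),
  `State.fpResult_eq` / `loadVec_eq` / the `readVec` projections (the exact rules' terms in the normal form).

  A WALKER THAT FREEZES THE STATE after every instruction (a fresh variable `s` with `w_mxcsr : s.mxcsr = mx1` …) is served too: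
  `u_sseok` looks for a hypothesis `SseOK s`, then for `s.mxcsr = w` with the mask fact of `w` (`u_sseok_by_fact`).
-/
import UserX.StepAt
import UserX.MemNorm
import UserX.Sse
import UserX.MicroOK
set_option linter.unusedSimpArgs false

/-- `set_option userx.sseExact true in tac`: the SSE rules leave the model's exact new state instead of an opaque one. -/
register_option userx.sseExact : Bool := {
  defValue := false
  descr := "u_sse_rule: apply the exact rules of UserX/Sse.lean (the model's own terms) instead of the opaque ones"
}

namespace X86
namespace User
namespace State

/-! ### Projections through the two SSE setters -/

@[u_step] theorem reg_writeVecLow (u : State) (w : VWidth) (v : VReg) (x : Vec) (r : Reg) :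
    (u.writeVecLow w v x).reg r = u.reg r := id rfl
@[u_step] theorem rip_writeVecLow (u : State) (w : VWidth) (v : VReg) (x : Vec) : (u.writeVecLow w v x).rip = u.rip := id rfl
@[u_step] theorem flags_writeVecLow (u : State) (w : VWidth) (v : VReg) (x : Vec) : (u.writeVecLow w v x).flags = u.flags :=
  id rfl
@[u_step] theorem mem_writeVecLow (u : State) (w : VWidth) (v : VReg) (x : Vec) : (u.writeVecLow w v x).mem = u.mem := id rfl
@[u_step] theorem mxcsr_writeVecLow (u : State) (w : VWidth) (v : VReg) (x : Vec) : (u.writeVecLow w v x).mxcsr = u.mxcsr :=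
  id rfl
@[u_step] theorem part_writeVecLow (u : State) (w : VWidth) (v : VReg) (x : Vec) (k : Width) (r : Reg) :
    (u.writeVecLow w v x).part k r = u.part k r := id rfl
@[u_step] theorem hi8_writeVecLow (u : State) (w : VWidth) (v : VReg) (x : Vec) (r : Reg) :
    (u.writeVecLow w v x).hi8 r = u.hi8 r := id rfl
@[u_step] theorem hi8_setMxcsr (u : State) (r : Reg) (x : Word) : (u.setMxcsr x).hi8 r = u.hi8 r := id rfl

/-- A vector register read through a setter that does not touch the vector registers (the exact rules read sources). -/
@[u_step] theorem readVec_setReg (u : State) (r : Reg) (x : Word) (w : VWidth) (v : VReg) :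
    (u.setReg r x).readVec w v = u.readVec w v := id rfl
@[u_step] theorem readVec_setRip (u : State) (x : Word) (w : VWidth) (v : VReg) : (u.setRip x).readVec w v = u.readVec w v :=
  id rfl
@[u_step] theorem readVec_setFlags (u : State) (f : Flags) (w : VWidth) (v : VReg) :
    (u.setFlags f).readVec w v = u.readVec w v := id rfl
@[u_step] theorem readVec_setMem (u : State) (μ : Mem) (w : VWidth) (v : VReg) : (u.setMem μ).readVec w v = u.readVec w v :=
  id rfl
@[u_step] theorem readVec_setMxcsr (u : State) (x : Word) (w : VWidth) (v : VReg) :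
    (u.setMxcsr x).readVec w v = u.readVec w v := id rfl

/-! ### The normal form with `writeVecLow` and `setMxcsr`

Between the general registers (innermost) and memory: first the vector registers in register order, then MXCSR. -/

/-- `writeVecLow` goes inside RIP, RFLAGS, memory and MXCSR. -/
@[u_norm] theorem setRip_writeVecLow (u : State) (a : Word) (w : VWidth) (v : VReg) (x : Vec) :
    (u.setRip a).writeVecLow w v x = (u.writeVecLow w v x).setRip a := by
  cases u
  rfl
@[u_norm] theorem setFlags_writeVecLow (u : State) (f : Flags) (w : VWidth) (v : VReg) (x : Vec) :
    (u.setFlags f).writeVecLow w v x = (u.writeVecLow w v x).setFlags f := by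
  cases u
  rfl
@[u_norm] theorem setMem_writeVecLow (u : State) (μ : Mem) (w : VWidth) (v : VReg) (x : Vec) :
    (u.setMem μ).writeVecLow w v x = (u.writeVecLow w v x).setMem μ := by
  cases u
  rfl
@[u_norm] theorem setMxcsr_writeVecLow (u : State) (m : Word) (w : VWidth) (v : VReg) (x : Vec) :
    (u.setMxcsr m).writeVecLow w v x = (u.writeVecLow w v x).setMxcsr m := by
  cases u
  rfl

/-- A general register write goes inside the vector registers and MXCSR. -/
@[u_norm] theorem writeVecLow_setReg (u : State) (w : VWidth) (v : VReg) (x : Vec) (r : Reg) (y : Word) :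
    (u.writeVecLow w v x).setReg r y = (u.setReg r y).writeVecLow w v x := by
  cases u
  rfl
@[u_norm] theorem setMxcsr_setReg (u : State) (m : Word) (r : Reg) (y : Word) :
    (u.setMxcsr m).setReg r y = (u.setReg r y).setMxcsr m := by
  cases u
  rfl

/-- MXCSR goes inside RIP, RFLAGS and memory. -/
@[u_norm] theorem setRip_setMxcsr (u : State) (a : Word) (m : Word) : (u.setRip a).setMxcsr m = (u.setMxcsr m).setRip a := by
  cases u
  rfl
@[u_norm] theorem setFlags_setMxcsr (u : State) (f : Flags) (m : Word) :
    (u.setFlags f).setMxcsr m = (u.setMxcsr m).setFlags f := by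
  cases u
  rfl
@[u_norm] theorem setMem_setMxcsr (u : State) (μ : Mem) (m : Word) : (u.setMem μ).setMxcsr m = (u.setMxcsr m).setMem μ := by
  cases u
  rfl

/-- The later MXCSR value overwrites. -/
@[u_norm] theorem setMxcsr_setMxcsr (u : State) (a b : Word) : (u.setMxcsr a).setMxcsr b = u.setMxcsr b := by
  cases u
  rfl

/-- Merging a low part into a vector register twice: the second value wins, the bits above the width are the old ones. -/
theorem merge_merge (m a b old : BitVec 512) :
    (b &&& m) ||| (((a &&& m) ||| (old &&& ~~~m)) &&& ~~~m) = (b &&& m) ||| (old &&& ~~~m) := by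
  apply BitVec.eq_of_getElem_eq
  intro i hi
  simp only [BitVec.getElem_or, BitVec.getElem_and, BitVec.getElem_not]
  cases m[i] <;> cases a[i] <;> cases b[i] <;> cases old[i] <;> rfl

/-- The later write of the same vector register (at the same width) overwrites. -/
@[u_norm] theorem writeVecLow_writeVecLow (u : State) (w : VWidth) (v : VReg) (a b : Vec) :
    (u.writeVecLow w v a).writeVecLow w v b = u.writeVecLow w v b := by
  cases u with
  | mk regs rip flags zmm mxcsr mem =>
    simp only [writeVecLow]
    congr 1
    rw [Vector.set_set]
    congr 1
    simp only [Fin.getElem_fin, Vector.getElem_set_self]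
    exact merge_merge _ _ _ _

/-- Writes of different vector registers commute. -/
theorem writeVecLow_comm (u : State) (w w' : VWidth) (r s : VReg) (a b : Vec) (h : r.val ≠ s.val) :
    (u.writeVecLow w r a).writeVecLow w' s b = (u.writeVecLow w' s b).writeVecLow w r a := by
  cases u with
  | mk regs rip flags zmm mxcsr mem =>
    simp only [writeVecLow]
    congr 1
    apply Vector.ext
    intro i hi
    simp only [Vector.getElem_set, Fin.getElem_fin]
    by_cases h1 : s.val = i <;> by_cases h2 : r.val = i <;> simp [h1, h2] <;> omega

/-- A vector register read back at the width it was written (`Sem.readVec_writeVecLow`, in the stepping set). -/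
@[u_step] theorem readVec_writeVecLow_same (u : State) (r : VReg) (x : Vec) :
    (u.writeVecLow .v128 r x).readVec .v128 r = x.trunc 128 :=
  Sem.readVec_writeVecLow r x

/-- A vector register read through the write of another one. -/
theorem readVec_writeVecLow_other (u : State) (w w' : VWidth) (r s : VReg) (x : Vec) (h : r.val ≠ s.val) :
    (u.writeVecLow w r x).readVec w' s = u.readVec w' s := by
  cases u with
  | mk regs rip flags zmm mxcsr mem =>
    simp only [writeVecLow, readVec, Fin.getElem_fin]
    rw [Vector.getElem_set_ne _ _ h]

end State
end User
end X86

namespace UserX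
open Lean Meta Elab Command

/-- The 120 instances `(u.writeVecLow w hi x).writeVecLow w' lo y = (u.writeVecLow w' lo y).writeVecLow w hi x` for `lo < hi`
among XMM0–15 (the registers a legacy encoding reaches), tagged `u_norm`: the lower register number ends up inside. And the
240 instances of a read through the write of another register, tagged `u_step` (the exact rules read their sources). -/
elab "#u_gen_writeVecLow_comm" : command => do
  for i in [0:16] do
    for j in [i+1:16] do
      let lo := Syntax.mkNumLit (toString i)
      let hi := Syntax.mkNumLit (toString j)
      let nm := mkIdent (`X86.User.State ++ Name.mkSimple s!"writeVecLow_comm_{j}_{i}")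
      elabCommand (← `(command|
        @[u_norm] theorem $nm (u : X86.User.State) (w w' : X86.VWidth) (x y : X86.Vec) :
            (u.writeVecLow w ($hi : X86.VReg) x).writeVecLow w' ($lo : X86.VReg) y
              = (u.writeVecLow w' ($lo : X86.VReg) y).writeVecLow w ($hi : X86.VReg) x :=
          X86.User.State.writeVecLow_comm u w w' $hi $lo x y (by decide)))
      let nm1 := mkIdent (`X86.User.State ++ Name.mkSimple s!"readVec_writeVecLow_{j}_{i}")
      elabCommand (← `(command|
        @[u_step] theorem $nm1 (u : X86.User.State) (w w' : X86.VWidth) (x : X86.Vec) :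
            (u.writeVecLow w ($hi : X86.VReg) x).readVec w' ($lo : X86.VReg) = u.readVec w' ($lo : X86.VReg) :=
          X86.User.State.readVec_writeVecLow_other u w w' $hi $lo x (by decide)))
      let nm2 := mkIdent (`X86.User.State ++ Name.mkSimple s!"readVec_writeVecLow_{i}_{j}")
      elabCommand (← `(command|
        @[u_step] theorem $nm2 (u : X86.User.State) (w w' : X86.VWidth) (x : X86.Vec) :
            (u.writeVecLow w ($lo : X86.VReg) x).readVec w' ($hi : X86.VReg) = u.readVec w' ($hi : X86.VReg) :=
          X86.User.State.readVec_writeVecLow_other u w w' $lo $hi x (by decide)))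

end UserX

#u_gen_writeVecLow_comm

namespace X86
namespace User

/-! ### Effective addresses and loaded vectors in the stepper's vocabulary -/

/-- **The effective address of a decoded memory operand, written out**: on an operand literal the stepping set evaluates the
`if` / `match` and the truncation (`Word.truncAddr_64`), the facts about the state evaluate the registers, `addr_norm`
collects the literals — what is left is `base ± literal`, `base + index * scale ± literal`, or a literal (RIP-relative). -/
@[u_step] theorem State.ea_eq (u : State) (a : MemOp) :
    u.ea a = truncAddr a.addrBits
      ((if a.ripRel then u.rip else match a.base with | none => 0 | some r => u.reg r)
        + (match a.index with | none => 0 | some (r, s) => u.reg r * UInt64.ofNat s) + a.disp) := id rfl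

/-- The state after an exact floating-point step, in the two setters of the normal form. -/
@[u_step] theorem State.fpResult_eq (u : State) (dst : VReg) (v : Vec) (f : FP.Flags) :
    u.fpResult dst v f = (u.setMxcsr (Sem.mxcsrAfter u.mxcsr f)).writeVecLow .v128 dst v := id rfl

/-- The vector a load delivers, in terms of the flat memory (the exact rules). -/
@[u_step] theorem State.loadVec_eq (u : State) (a : MemOp) (n : Nat) :
    u.loadVec a n = BitVec.ofNat 512 (u.mem.readLE (u.ea a) n) := id rfl

end User
end X86

namespace UserX
open Lean Meta Simp

/-- Evaluate `Word.aligned a n` on two literals (the alignment side condition of a RIP-relative 16-byte operand, once RIP is a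
literal); the result carries a `decide` proof. -/
simproc_decl reduceAligned (X86.Word.aligned _ _) := fun e => do
  unless e.isAppOfArity ``X86.Word.aligned 2 do
    return .continue
  let some a ← Word.Lit.fromExpr64 e.appFn!.appArg! | return .continue
  let some n ← Nat.fromExpr? e.appArg! | return .continue
  let r := toExpr (X86.Word.aligned a n)
  let prf ← mkDecideProof (← mkEq e r)
  return .done { expr := r, proof? := some prf }

end UserX

attribute [u_step_proc] UserX.reduceAligned

namespace X86
namespace User

/-! ### `SseOK` along a nest of setters -/

/-- `SseOK` from the mask bits of MXCSR. -/
theorem SseOK.of_masks {u : State} (h : u.mxcsr &&& 0x1F80 = 0x1F80) : SseOK u := ⟨h⟩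

namespace SseOK
variable {u : State}

/-- **No integer setter touches MXCSR**: `SseOK` of the new state for every setter of the stepper's normal form. -/
theorem keep_setReg (h : SseOK u) (r : Reg) (x : Word) : SseOK (u.setReg r x) := h.of_mxcsr rfl
theorem keep_setRip (h : SseOK u) (x : Word) : SseOK (u.setRip x) := h.of_mxcsr rfl
theorem keep_setFlags (h : SseOK u) (f : Flags) : SseOK (u.setFlags f) := h.of_mxcsr rfl
theorem keep_setMem (h : SseOK u) (μ : Mem) : SseOK (u.setMem μ) := h.of_mxcsr rfl
theorem keep_writePart (h : SseOK u) (w : Width) (r : Reg) (x : BitVec w.bits) : SseOK (u.writePart w r x) := h.of_mxcsr rfl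
theorem keep_writeHi8 (h : SseOK u) (r : Reg) (x : BitVec 8) : SseOK (u.writeHi8 r x) := h.of_mxcsr rfl
theorem keep_writeVecLow (h : SseOK u) (w : VWidth) (v : VReg) (x : Vec) : SseOK (u.writeVecLow w v x) := h.of_mxcsr rfl

/-- **A write of MXCSR that keeps the six mask bits set** (what every SSE rule leaves: `hmx1`). -/
theorem of_setMxcsr (w : Word) (hw : w &&& 0x1F80 = 0x1F80) : SseOK (u.setMxcsr w) := ⟨hw⟩

end SseOK

/-- The mask bits of MXCSR after an exact floating-point step are those before (for `u_sseok`; `Sem.mxcsrAfter_masks`). -/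
theorem mxcsrAfter_masks_eq (w : Word) (f : FP.Flags) (h : w &&& 0x1F80 = 0x1F80) :
    Sem.mxcsrAfter w f &&& 0x1F80 = 0x1F80 := by
  rw [Sem.mxcsrAfter_masks, h]

end User
end X86

namespace UserX
open Lean Meta Elab Tactic

/-- The goal mentions `v.mxcsr` for a state VARIABLE `v` (a walker that freezes the state after every instruction keeps
`w_mxcsr : v.mxcsr = mx1` as a hypothesis): rewrite with the hypotheses of that shape, then look for the mask fact. -/
elab "u_sseok_by_fact" : tactic => withMainContext do
  for d in ← getLCtx do
    if d.isImplementationDetail then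
      continue
    let t := (← instantiateMVars d.type).cleanupAnnotations
    let some (_, lhs, _) := t.eq? | continue
    unless lhs.isAppOfArity ``X86.User.State.mxcsr 1 do
      continue
    let id := mkIdent d.userName
    let saved ← saveState
    try
      evalTactic (← `(tactic| (rw [$id:ident]; with_reducible assumption)))
      return
    catch _ =>
      saved.restore
  throwError "u_sseok_by_fact: no hypothesis `v.mxcsr = w` with the mask fact of `w` in the context"

end UserX

/-- `u_sseok`: the goal `SseOK u'`, `u'` the base state `u` under a nest of setters. A hypothesis, or: MXCSR read through the
nest is the value of the last `setMxcsr` — whose mask fact `hmx1` is in the context — or `u.mxcsr`, with `hs : SseOK u`, or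
(`u` a frozen state variable) a hypothesis `u.mxcsr = w` with the mask fact of `w`. -/
syntax "u_sseok" : tactic
macro_rules
  | `(tactic| u_sseok) => `(tactic| first
    | (with_reducible assumption)
    | (refine X86.User.SseOK.of_masks ?_
       try simp (implicitDefEqProofs := false) only [X86.User.State.mxcsr_setReg, X86.User.State.mxcsr_setRip,
         X86.User.State.mxcsr_setFlags, X86.User.State.mxcsr_setMem, X86.User.State.mxcsr_setMxcsr,
         X86.User.State.mxcsr_writeVecLow, X86.User.State.writePart_eq, X86.User.State.writeHi8_eq,
         X86.User.State.fpResult]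
       -- at REDUCIBLE transparency: after an exact step MXCSR is `mxcsrAfter w (… FP term …)`, and a unifier allowed to unfold
       -- it starts evaluating the floating-point computation
       first
       | (with_reducible assumption)
       | (with_reducible exact X86.User.SseOK.masks (by assumption))
       | ((with_reducible refine X86.User.mxcsrAfter_masks_eq _ _ ?_)
          first
          | (with_reducible assumption)
          | (with_reducible exact X86.User.SseOK.masks (by assumption)))
       | u_sseok_by_fact))

/-! ### The opaque rules M4 did not state, and the typed forms of the stores -/

namespace X86
namespace Sem
open User

variable {L : Layout} {μ : Microarch} {Q : Unit → State → Prop} {E : Fault → State → Prop} {u : State} {e : Encoding}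

/-- The mask that keeps the low `n` bits, as a number. -/
theorem lowMask_toNat_lt (n : Nat) (hn : n ≤ 512) : (Vec.lowMask n).toNat < 2 ^ n := by
  unfold Vec.lowMask
  rw [BitVec.toNat_ushiftRight, BitVec.toNat_allOnes, Nat.shiftRight_eq_div_pow]
  have hsplit : (2 : Nat) ^ 512 = 2 ^ n * 2 ^ (512 - n) := by
    rw [← Nat.pow_add]
    congr 1
    omega
  have hpos : 0 < (2 : Nat) ^ (512 - n) := Nat.pow_pos (by decide)
  apply (Nat.div_lt_iff_lt_mul hpos).mpr
  omega

/-- A vector truncated to `n` bits is below `2 ^ n`. -/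
theorem trunc_toNat_lt (v : Vec) (n : Nat) (hn : n ≤ 512) : (v.trunc n).toNat < 2 ^ n := by
  unfold Vec.trunc
  rw [BitVec.toNat_and]
  exact Nat.lt_of_le_of_lt Nat.and_le_right (lowMask_toNat_lt n hn)

/-- A number below `2 ^ n` is the number of an `n`-bit value. -/
theorem toNat_ofNat_of_lt (n k : Nat) (h : k < 2 ^ n) : (BitVec.ofNat n k).toNat = k := by
  rw [BitVec.toNat_ofNat]
  exact Nat.mod_eq_of_lt h

/-- **`movss m32, xmm`, the bytes stored left open**: SOME 32-bit value is stored at the operand (the stepper's form of a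
4-byte store: `writeLE a 4 x.toNat`, `x : BitVec 32`). -/
theorem wpUser_movss_store_typed (he : Legacy e) (hμ : SseMicro μ) (a : MemOp) (src : VReg) (hhas : L.Has (u.ea a) 4)
    (h : ∀ x : BitVec 32, Q () (u.setMem (u.mem.writeLE (u.ea a) 4 x.toNat))) :
    wpUser L μ (Insn.MOVSS.storeBody e a src) Q E u := by
  refine wpUser_movss_store he hμ a src hhas ?_
  have hx := h (BitVec.ofNat 32 ((u.readVec .v512 src).trunc 32).toNat)
  rw [toNat_ofNat_of_lt 32 _ (trunc_toNat_lt _ 32 (by decide))] at hx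
  exact hx

/-- **`movsd m64, xmm`, the bytes stored left open.** -/
theorem wpUser_movsd_store_typed (he : Legacy e) (hμ : SseMicro μ) (a : MemOp) (src : VReg) (hhas : L.Has (u.ea a) 8)
    (h : ∀ x : BitVec 64, Q () (u.setMem (u.mem.writeLE (u.ea a) 8 x.toNat))) :
    wpUser L μ (Insn.MOVSD.storeBody e a src) Q E u := by
  refine wpUser_movsd_store he hμ a src hhas ?_
  have hx := h (BitVec.ofNat 64 ((u.readVec .v512 src).trunc 64).toNat)
  rw [toNat_ofNat_of_lt 64 _ (trunc_toNat_lt _ 64 (by decide))] at hx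
  exact hx

/-- **MOVUPS / MOVDQU `m128, xmm`, the bytes stored left open.** -/
theorem wpUser_movu_store_typed (he : Legacy e) (hμ : SseMicro μ) (s : Insn.MOVAPS.Spec) (hsp : MoveSpec s e μ)
    (hacc : s.acc e = SimdMem.unalignedMove) (a : MemOp) (src : VReg) (hhas : L.Has (u.ea a) 16)
    (h : ∀ x : BitVec 128, Q () (u.setMem (u.mem.writeLE (u.ea a) 16 x.toNat))) :
    wpUser L μ (Insn.MOVAPS.execMr s e (.vmem a) src) Q E u := by
  refine wpUser_movu_store he hμ s hsp hacc a src hhas ?_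
  have hx := h (BitVec.ofNat 128 ((u.readVec .v128 src).trunc 128).toNat)
  rw [toNat_ofNat_of_lt 128 _ (trunc_toNat_lt _ 128 (by decide))] at hx
  exact hx

/-- **MOVAPS / MOVAPD `xmm, xmm`, the value left open.** -/
theorem wpUser_movap_reg_opaque (he : Legacy e) (hμ : SseMicro μ) (s : Insn.MOVAPS.Spec) (hsp : MoveSpec s e μ)
    (dst src : VReg) (h : ∀ x : Vec, Q () (u.writeVecLow .v128 dst x)) :
    wpUser L μ (Insn.MOVAPS.execRm s e dst (.vreg src)) Q E u :=
  wpUser_movap_reg he hμ s hsp dst src (h _)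

/-- **MOVDQU / MOVUPS `xmm, m128`, the value left open.** -/
theorem wpUser_movu_load_opaque (he : Legacy e) (hμ : SseMicro μ) (s : Insn.MOVAPS.Spec) (hsp : MoveSpec s e μ)
    (hacc : s.acc e = SimdMem.unalignedMove) (dst : VReg) (a : MemOp) (hhas : L.Has (u.ea a) 16)
    (h : ∀ x : Vec, Q () (u.writeVecLow .v128 dst x)) :
    wpUser L μ (Insn.MOVAPS.execRm s e dst (.vmem a)) Q E u :=
  wpUser_movu_load he hμ s hsp hacc dst a hhas (h _)

/-- **PXOR … `xmm, xmm`, the value left open.** -/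
theorem wpUser_packedLogic_reg_opaque (he : Legacy e) (hμ : SseMicro μ) (fv : Vec → Vec → Vec) (fw : Word → Word → Word)
    (dst src1 src2 : VReg) (h : ∀ x : Vec, Q () (u.writeVecLow .v128 dst x)) :
    wpUser L μ (Insn.PAND.packedLogic fv fw e dst src1 (.vreg src2)) Q E u :=
  wpUser_packedLogic_reg he hμ fv fw dst src1 src2 (h _)

/-- **MOVD `xmm, r32` / MOVQ `xmm, r64`, the value left open.** -/
theorem wpUser_movd_to_xmm_opaque (he : Legacy e) (hμ : SseMicro μ) (dst : VReg) (w : Width) (hw : w = .w32 ∨ w = .w64)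
    (r : Reg) (h : ∀ x : Vec, Q () (u.writeVecLow .v128 dst x)) :
    wpUser L μ (Insn.MOVD_MOVQ.execRm e dst (.reg w r)) Q E u :=
  wpUser_movd_to_xmm he hμ dst w hw r (h _)

/-- The flags of a floating-point compare define all six status flags: the flags term stays one layer deep
(`State.setStatus_collapse`). -/
@[u_step] theorem comisStatus_writesAll (r : FP.Cmp) : (comisStatus r).writesAll = true := by
  cases r <;> rfl

/-- The 16 bytes a `movdqu` loaded, as the number a `movups` of the same register stores (the exact rules; `movu_roundtrip`
says the same of two states). -/
@[u_step] theorem trunc128_ofNat_readLE (f : Mem) (a : Word) :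
    (Vec.trunc (BitVec.ofNat 512 (f.readLE a 16)) 128).toNat = f.readLE a 16 :=
  trunc128_toNat _ (Mem.readLE_lt f a 16)

attribute [u_step] trunc128_idem

end Sem
end X86

/-! ### Closing the hypotheses of a rule -/

namespace UserX
open Lean Meta Elab Tactic

/-- Introduce the universally quantified opaque values of a rule's continuation with the names a proof script can use:
`mx1 : Word` (MXCSR), `x1` (a vector, a typed value), `cmp1 : FP.Cmp`, `hmx1` (the mask fact). -/
def introOpaque (g : MVarId) : MetaM MVarId := g.withContext do
  let mut cur := g
  let mut go := true
  while go do
    let t := (← instantiateMVars (← cur.getType)).cleanupAnnotations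
    if t.isForall then
      let dom := t.bindingDomain!
      let domW ← cur.withContext (whnfR dom)
      let domIsProp ← cur.withContext (isProp dom)
      let name : Name :=
        if dom.isConstOf ``X86.Word || domW.isConstOf ``UInt64 then `mx1
        else if domW.isConstOf ``FP.Cmp then `cmp1
        else if domIsProp then `hmx1
        else `x1
      let (f, g') ← cur.intro name
      cur := g'
      -- `x1 : BitVec Width.w32.bits` (CVTTSD2SI, MOVD to a general register) is shown as `x1 : BitVec 32`
      if dom.isAppOfArity ``BitVec 1 then
        let n ← cur.withContext (whnf dom.appArg!)
        if n.isRawNatLit || n.isAppOfArity ``OfNat.ofNat 3 then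
          cur ← cur.changeLocalDecl f (mkApp (mkConst ``BitVec) n)
    else
      go := false
  return cur

/-- What becomes of ONE goal an SSE rule left, by its shape (see the head of the file). -/
elab "u_sse_side" : tactic => withMainContext do
  let g ← getMainGoal
  let t := (← instantiateMVars (← g.getType)).cleanupAnnotations
  let closeOrTag (tac : TSyntax `tactic) (tag : Name) : TacticM Unit := do
    let saved ← saveState
    try
      evalTactic tac
      unless (← getUnsolvedGoals).isEmpty do
        throwError "not closed"
    catch _ =>
      saved.restore
      (← getMainGoal).setTag tag
  if t.isForall || t.getAppFn.isFVar then
    -- the continuation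
    let g' ← introOpaque g
    g'.setTag `cont
    replaceMainGoal [g']
  else if t.isAppOf ``X86.User.Legacy then
    evalTactic (← `(tactic| exact ⟨rfl, rfl, rfl⟩))
  else if t.isAppOf ``X86.User.SseMicro then
    closeOrTag (← `(tactic| u_sse_micro)) `side_micro
  else if t.isAppOf ``X86.User.SseOK then
    closeOrTag (← `(tactic| u_sseok)) `side_sseok
  else if t.isAppOf ``X86.User.FlagsOK then
    closeOrTag (← `(tactic| u_flagsok_state)) `side_flagsok
  else if t.isAppOfArity ``X86.Sem.MoveSpec 3 then
    -- by the name of the spec (trying the four lemmas in turn would have the unifier unfold the specs: seconds)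
    let tac ← match (t.getArg! 0).getAppFn.constName? with
      | some ``X86.Insn.MOVAPS.spec => `(tactic| exact X86.Sem.moveSpec_movaps ⟨rfl, rfl, rfl⟩ (by u_sse_micro))
      | some ``X86.Insn.MOVAPD.spec => `(tactic| exact X86.Sem.moveSpec_movapd ⟨rfl, rfl, rfl⟩ (by u_sse_micro))
      | some ``X86.Insn.MOVUPS.spec => `(tactic| exact X86.Sem.moveSpec_movups ⟨rfl, rfl, rfl⟩ (by u_sse_micro))
      | some ``X86.Insn.MOVDQU_VMOVDQU8_16_32_64.spec =>
        `(tactic| exact X86.Sem.moveSpec_movdqu ⟨rfl, rfl, rfl⟩ (by u_sse_micro))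
      | _ => throwError "u_sse_side: no `MoveSpec` lemma for {t.getArg! 0}"
    closeOrTag tac `side_micro
  else if t.isAppOf ``Or then
    evalTactic (← `(tactic| first | exact Or.inl rfl | exact Or.inr rfl))
  else if t.isAppOf ``Ne then
    evalTactic (← `(tactic| decide))
  else if t.isAppOf ``X86.Sem.SrcOK then
    -- a register source asks nothing; a memory source asks for its bytes
    evalTactic (← `(tactic| first
      | exact trivial
      | (show X86.User.Layout.Has _ _ _)))
    for g' in ← getUnsolvedGoals do
      g'.setTag `side_has
  else if t.isAppOf ``X86.Sem.GprSrcOK then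
    evalTactic (← `(tactic| first
      | (show _ ≠ _; decide)
      | (refine And.intro (by decide) ?_)))
    for g' in ← getUnsolvedGoals do
      g'.setTag `side_has
  else if t.isAppOf ``X86.User.Layout.Has then
    g.setTag `side_has
  else if t.isAppOfArity ``Eq 3 && (t.getArg! 1).isAppOf ``X86.Word.aligned then
    -- the alignment of a 16-byte operand: evaluated by the stepping set when the address is a literal
    g.setTag `side_align
  else if t.isAppOf ``Eq then
    -- a closed fact about the encoding (`s.acc e = SimdMem.unalignedMove`)
    closeOrTag (← `(tactic| rfl)) `side
  else
    g.setTag `side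

end UserX

/-- Apply to every goal an SSE rule left. -/
macro "u_sse_sides" : tactic => `(tactic| all_goals u_sse_side)

/-! ### One tactic per family of bodies -/

/-- MOVSS `xmm, m32`. -/
macro "u_sse_movss_load" : tactic => `(tactic| (apply X86.Sem.wpUser_movss_load_opaque; u_sse_sides))
macro "u_sse_movss_load_exact" : tactic => `(tactic| (apply X86.Sem.wpUser_movss_load; u_sse_sides))
/-- MOVSD `xmm, m64`. -/
macro "u_sse_movsd_load" : tactic => `(tactic| (apply X86.Sem.wpUser_movsd_load_opaque; u_sse_sides))
macro "u_sse_movsd_load_exact" : tactic => `(tactic| (apply X86.Sem.wpUser_movsd_load; u_sse_sides))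
/-- MOVSS `m32, xmm`. -/
macro "u_sse_movss_store" : tactic => `(tactic| (apply X86.Sem.wpUser_movss_store_typed; u_sse_sides))
macro "u_sse_movss_store_exact" : tactic => `(tactic| (apply X86.Sem.wpUser_movss_store; u_sse_sides))
/-- MOVSD `m64, xmm`. -/
macro "u_sse_movsd_store" : tactic => `(tactic| (apply X86.Sem.wpUser_movsd_store_typed; u_sse_sides))
macro "u_sse_movsd_store_exact" : tactic => `(tactic| (apply X86.Sem.wpUser_movsd_store; u_sse_sides))

/-- ADDSS ADDSD SUBSS SUBSD MULSS MULSD (`Insn.ADDSS.scalarFpArith`): a register source, a memory source. (The dispatcher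
picks by the operand: a rule for the other operand form fails only after the unifier has unfolded both bodies — a second.) -/
macro "u_sse_arith_reg" : tactic => `(tactic| (apply X86.Sem.wpUser_scalarFpArith_reg_opaque; u_sse_sides))
macro "u_sse_arith_mem" : tactic => `(tactic| (apply X86.Sem.wpUser_scalarFpArith_mem_opaque; u_sse_sides))
macro "u_sse_arith_reg_exact" : tactic => `(tactic| (apply X86.Sem.wpUser_scalarFpArith_reg; u_sse_sides))
macro "u_sse_arith_mem_exact" : tactic => `(tactic| (apply X86.Sem.wpUser_scalarFpArith_mem; u_sse_sides))

/-- DIVSS DIVSD (`Insn.DIVSS.scalarFpArith`): a register source, a memory source. -/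
macro "u_sse_div_reg" : tactic => `(tactic| (apply X86.Sem.wpUser_scalarFpDiv_reg_opaque; u_sse_sides))
macro "u_sse_div_mem" : tactic => `(tactic| (apply X86.Sem.wpUser_scalarFpDiv_mem_opaque; u_sse_sides))
macro "u_sse_div_reg_exact" : tactic => `(tactic| (apply X86.Sem.wpUser_scalarFpDiv_reg; u_sse_sides))
macro "u_sse_div_mem_exact" : tactic => `(tactic| (apply X86.Sem.wpUser_scalarFpDiv_mem; u_sse_sides))

/-- The conversions: the rules of UserX/Sse.lean are opaque (the converted value is left open). -/
macro "u_sse_cvtss2sd" : tactic => `(tactic| (apply X86.Sem.wpUser_cvtss2sd; u_sse_sides))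
macro "u_sse_cvtsd2ss" : tactic => `(tactic| (apply X86.Sem.wpUser_cvtsd2ss; u_sse_sides))
macro "u_sse_cvtsi2ss" : tactic => `(tactic| (apply X86.Sem.wpUser_cvtsi2ss; u_sse_sides))
macro "u_sse_cvtsi2sd" : tactic => `(tactic| (apply X86.Sem.wpUser_cvtsi2sd; u_sse_sides))
macro "u_sse_cvttsd2si" : tactic => `(tactic| (apply X86.Sem.wpUser_cvttsd2si; u_sse_sides))

/-- COMISS COMISD UCOMISS UCOMISD (`Insn.UCOMISS.comis`): the outcome of the compare is left open. -/
macro "u_sse_comis" : tactic => `(tactic| (apply X86.Sem.wpUser_comis; u_sse_sides))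

/-- MOVAPS MOVAPD `xmm, xmm`; MOVUPS MOVDQU `xmm, m128` (`Insn.MOVAPS.execRm`). -/
macro "u_sse_move_rm_reg" : tactic => `(tactic| (apply X86.Sem.wpUser_movap_reg_opaque; u_sse_sides))
macro "u_sse_move_rm_mem" : tactic => `(tactic| (apply X86.Sem.wpUser_movu_load_opaque; u_sse_sides))
macro "u_sse_move_rm_reg_exact" : tactic => `(tactic| (apply X86.Sem.wpUser_movap_reg; u_sse_sides))
macro "u_sse_move_rm_mem_exact" : tactic => `(tactic| (apply X86.Sem.wpUser_movu_load; u_sse_sides))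

/-- MOVUPS MOVDQU `m128, xmm` (`Insn.MOVAPS.execMr`). -/
macro "u_sse_move_mr" : tactic => `(tactic| (apply X86.Sem.wpUser_movu_store_typed; u_sse_sides))
macro "u_sse_move_mr_exact" : tactic => `(tactic| (apply X86.Sem.wpUser_movu_store; u_sse_sides))

/-- MOVD `xmm, r32` / MOVQ `xmm, r64` (`Insn.MOVD_MOVQ.execRm`). -/
macro "u_sse_movd_rm" : tactic => `(tactic| (apply X86.Sem.wpUser_movd_to_xmm_opaque; u_sse_sides))
macro "u_sse_movd_rm_exact" : tactic => `(tactic| (apply X86.Sem.wpUser_movd_to_xmm; u_sse_sides))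

/-- MOVD `r32, xmm` / MOVQ `r64, xmm` (`Insn.MOVD_MOVQ.execMr`). -/
macro "u_sse_movd_mr" : tactic => `(tactic| (apply X86.Sem.wpUser_movd_from_xmm_opaque; u_sse_sides))
macro "u_sse_movd_mr_exact" : tactic => `(tactic| (apply X86.Sem.wpUser_movd_from_xmm; u_sse_sides))

/-- PAND PANDN POR PXOR `xmm, xmm` (`Insn.PAND.packedLogic`). -/
macro "u_sse_packed_logic" : tactic => `(tactic| (apply X86.Sem.wpUser_packedLogic_reg_opaque; u_sse_sides))
macro "u_sse_packed_logic_exact" : tactic => `(tactic| (apply X86.Sem.wpUser_packedLogic_reg; u_sse_sides))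

/-- ANDPS ANDPD ORPS ORPD XORPS XORPD `xmm, xmm` and `xmm, m128` (`Insn.ANDPS.logic`): opaque rules only. -/
macro "u_sse_fp_logic_reg" : tactic => `(tactic| (apply X86.Sem.wpUser_fpLogic_reg; u_sse_sides))
macro "u_sse_fp_logic_mem" : tactic => `(tactic| (apply X86.Sem.wpUser_fpLogic_mem; u_sse_sides))

/-! ### The dispatcher -/

namespace UserX
open Lean Meta Elab Tactic

/-- A family of SSE bodies: is the decoder's body the mnemonic's own wrapper (to unfold first)? The tactics of its rules: for a
register source and for a memory source (the same when one rule covers both), opaque and exact (the same when UserX/Sse.lean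
states only the opaque one). -/
structure SseFamily where
  isWrapper : Bool
  regOpaque : TSyntax `tactic
  memOpaque : TSyntax `tactic
  regExact : TSyntax `tactic
  memExact : TSyntax `tactic

/-- A family with one rule for every operand form. -/
def SseFamily.single (isWrapper : Bool) (opaqueTac exactTac : TSyntax `tactic) : SseFamily :=
  { isWrapper := isWrapper, regOpaque := opaqueTac, memOpaque := opaqueTac, regExact := exactTac, memExact := exactTac }

/-- **The table: head of the decoded body ↦ family.** Every SSE head of Vorbis/Dec/HEADS.txt is here, and the siblings of the
same families that the image does not use (UCOMISS). -/
def sseFamily? (head : Name) : TacticM (Option SseFamily) := do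
  let arith : SseFamily :=
    { isWrapper := true
      regOpaque := ← `(tactic| u_sse_arith_reg), memOpaque := ← `(tactic| u_sse_arith_mem)
      regExact := ← `(tactic| u_sse_arith_reg_exact), memExact := ← `(tactic| u_sse_arith_mem_exact) }
  let div : SseFamily :=
    { isWrapper := true
      regOpaque := ← `(tactic| u_sse_div_reg), memOpaque := ← `(tactic| u_sse_div_mem)
      regExact := ← `(tactic| u_sse_div_reg_exact), memExact := ← `(tactic| u_sse_div_mem_exact) }
  let comis : SseFamily := .single true (← `(tactic| u_sse_comis)) (← `(tactic| u_sse_comis))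
  match head with
  | ``X86.Insn.MOVSS.loadBody =>
    return some (.single false (← `(tactic| u_sse_movss_load)) (← `(tactic| u_sse_movss_load_exact)))
  | ``X86.Insn.MOVSS.storeBody =>
    return some (.single false (← `(tactic| u_sse_movss_store)) (← `(tactic| u_sse_movss_store_exact)))
  | ``X86.Insn.MOVSD.loadBody =>
    return some (.single false (← `(tactic| u_sse_movsd_load)) (← `(tactic| u_sse_movsd_load_exact)))
  | ``X86.Insn.MOVSD.storeBody =>
    return some (.single false (← `(tactic| u_sse_movsd_store)) (← `(tactic| u_sse_movsd_store_exact)))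
  | ``X86.Insn.ADDSS.addss => return some arith
  | ``X86.Insn.ADDSD.addsd => return some arith
  | ``X86.Insn.SUBSS.subss => return some arith
  | ``X86.Insn.SUBSD.subsd => return some arith
  | ``X86.Insn.MULSS.mulss => return some arith
  | ``X86.Insn.MULSD.mulsd => return some arith
  | ``X86.Insn.ADDSS.scalarFpArith => return some { arith with isWrapper := false }
  | ``X86.Insn.DIVSS.divss => return some div
  | ``X86.Insn.DIVSD.divsd => return some div
  | ``X86.Insn.DIVSS.scalarFpArith => return some { div with isWrapper := false }
  | ``X86.Insn.CVTSS2SD.cvtss2sd => return some (.single false (← `(tactic| u_sse_cvtss2sd)) (← `(tactic| u_sse_cvtss2sd)))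
  | ``X86.Insn.CVTSD2SS.cvtsd2ss => return some (.single false (← `(tactic| u_sse_cvtsd2ss)) (← `(tactic| u_sse_cvtsd2ss)))
  | ``X86.Insn.CVTSI2SS.cvtsi2ss => return some (.single false (← `(tactic| u_sse_cvtsi2ss)) (← `(tactic| u_sse_cvtsi2ss)))
  | ``X86.Insn.CVTSI2SD.cvtsi2sd => return some (.single false (← `(tactic| u_sse_cvtsi2sd)) (← `(tactic| u_sse_cvtsi2sd)))
  | ``X86.Insn.CVTTSD2SI.cvttsd2si =>
    return some (.single false (← `(tactic| u_sse_cvttsd2si)) (← `(tactic| u_sse_cvttsd2si)))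
  | ``X86.Insn.COMISS.comiss => return some comis
  | ``X86.Insn.COMISD.comisd => return some comis
  | ``X86.Insn.UCOMISS.ucomiss => return some comis
  | ``X86.Insn.UCOMISD.ucomisd => return some comis
  | ``X86.Insn.UCOMISS.comis => return some { comis with isWrapper := false }
  | ``X86.Insn.MOVAPS.execRm =>
    return some
      { isWrapper := false
        regOpaque := ← `(tactic| u_sse_move_rm_reg), memOpaque := ← `(tactic| u_sse_move_rm_mem)
        regExact := ← `(tactic| u_sse_move_rm_reg_exact), memExact := ← `(tactic| u_sse_move_rm_mem_exact) }
  | ``X86.Insn.MOVAPS.execMr =>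
    return some (.single false (← `(tactic| u_sse_move_mr)) (← `(tactic| u_sse_move_mr_exact)))
  | ``X86.Insn.MOVD_MOVQ.execRm =>
    return some (.single false (← `(tactic| u_sse_movd_rm)) (← `(tactic| u_sse_movd_rm_exact)))
  | ``X86.Insn.MOVD_MOVQ.execMr =>
    return some (.single false (← `(tactic| u_sse_movd_mr)) (← `(tactic| u_sse_movd_mr_exact)))
  | ``X86.Insn.PAND.packedLogic =>
    return some (.single false (← `(tactic| u_sse_packed_logic)) (← `(tactic| u_sse_packed_logic_exact)))
  | ``X86.Insn.ANDPS.logic =>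
    return some
      { isWrapper := false
        regOpaque := ← `(tactic| u_sse_fp_logic_reg), memOpaque := ← `(tactic| u_sse_fp_logic_mem)
        regExact := ← `(tactic| u_sse_fp_logic_reg), memExact := ← `(tactic| u_sse_fp_logic_mem) }
  | _ => return none

/-- Is one of the operands of the decoded body a memory operand (`VOperand.vmem a`, `Operand.mem w a`)? -/
def hasMemoryOperand (body : Expr) : Bool :=
  body.getAppArgs.any fun arg => arg.isAppOf ``X86.VOperand.vmem || arg.isAppOf ``X86.Operand.mem

/-- **The SSE dispatcher**: the goal is `wpUser L μ body Q E u`, `body` as decoded. Fails at once when the head of `body` is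
not an SSE family (the stepper then computes the body by unfolding). -/
elab "u_sse_rule" : tactic => withMainContext do
  let g ← getMainGoal
  let t := (← instantiateMVars (← g.getType)).cleanupAnnotations
  unless t.isAppOfArity ``X86.Sem.wpUser 7 do
    throwError "u_sse_rule: not a wpUser goal"
  let body := t.getArg! 3
  let some head := body.getAppFn.constName? | throwError "u_sse_rule: the body has no head constant"
  let some fam ← sseFamily? head | throwError "u_sse_rule: {head} is not an SSE family"
  let exact := (← getOptions).getBool `userx.sseExact false
  let mem := hasMemoryOperand body
  if fam.isWrapper then
    let wId := mkIdent head
    evalTactic (← `(tactic| unfold $wId:ident))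
  let tac :=
    if exact then
      if mem then fam.memExact else fam.regExact
    else
      if mem then fam.memOpaque else fam.regOpaque
  try
    evalTactic tac
  catch ex =>
    throwError "u_sse_rule: {head}: no rule of UserX/Sse.lean applies to this operand form\n{ex.toMessageData}"

/-- The free variables of a term, every SHARED subterm visited once (`collectFVars` keeps the set of visited subterms).
`Expr.containsFVar` (`hasAnyFVar`) has no cache: it walks the term as a TREE, and on a hypothesis that shares subterms — the
walker's `w_zmm` after some SSE writes: `zmm.set i (x &&& mask ||| zmm[i] &&& ~~~mask)`, the old value twice — that is
exponential (it was the whole cost of a walk that tracks the vector registers: 200 s instead of 50 s after 45 SSE steps). -/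
def fvarSetOf (e : Expr) : MetaM FVarIdSet := do
  let e ← instantiateMVars e
  return (collectFVars {} e).fvarSet

/-- `u_clear_stale [x1, mx1, hmx1]`: in every goal, clear the hypotheses with these names — the shadowed ones too — that
nothing mentions any more. A VARIABLE goes when neither the goal nor another hypothesis mentions it; a FACT (a hypothesis
whose type is a proposition, like `hmx1 : mx1 &&& 1F80H = 1F80H`) goes when the listed variables it is about are mentioned
nowhere else. For the variables a rule or a contract introduces at every use: a value that was overwritten is of no use.
(Which variables the target and each hypothesis mention is computed once per goal, with `fvarSetOf`, when the first listed
fact is met.) -/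
elab "u_clear_stale " "[" names:ident,* "]" : tactic => do
  let listed : List Name := names.getElems.toList.map fun n => n.getId.eraseMacroScopes
  let isListed (n : Name) : Bool := listed.contains n.eraseMacroScopes
  let gs ← getUnsolvedGoals
  let mut out : List MVarId := []
  for g in gs do
    let mut cur := g
    -- the free variables of the target and of every hypothesis of the goal
    let mut occ? : Option (FVarIdSet × Std.HashMap FVarId FVarIdSet) := none
    let decls := (← g.getDecl).lctx.getFVarIds
    for f in decls.reverse do
      let some d := (← cur.getDecl).lctx.find? f | continue
      unless isListed d.userName do
        continue
      let ty ← instantiateMVars d.type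
      let isFact ← cur.withContext (isProp ty)
      if isFact then
        -- the listed variables this fact is about
        let lctx := (← cur.getDecl).lctx
        let about := (collectFVars {} ty).fvarIds.filter fun v =>
          match lctx.find? v with
          | some dv => isListed dv.userName
          | none => false
        if about.isEmpty then
          continue
        let (targetVars, hypVars) ← match occ? with
          | some o => pure o
          | none =>
            let targetVars ← fvarSetOf (← cur.getType)
            let mut hypVars : Std.HashMap FVarId FVarIdSet := {}
            for d' in lctx do
              hypVars := hypVars.insert d'.fvarId (← fvarSetOf d'.type)
            occ? := some (targetVars, hypVars)
            pure (targetVars, hypVars)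
        let mut stale := true
        for v in about do
          if targetVars.contains v then
            stale := false
          -- (only the hypotheses that are still there: `lctx` is the context of `cur`)
          for d' in lctx do
            if d'.fvarId != f && d'.fvarId != v then
              if let some vars := hypVars[d'.fvarId]? then
                if vars.contains v then
                  stale := false
        if stale then
          cur ← cur.tryClear f
      else
        cur ← cur.tryClear f
    out := out ++ [cur]
  setGoals out

end UserX

/-- `u_exact_sse tac`: run `tac` (a step) with the EXACT SSE rules. -/
macro "u_exact_sse " t:tacticSeq : tactic => `(tactic| set_option userx.sseExact true in ($t))

/-! ### Registration at the stepper's extension points -/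

macro_rules
  | `(tactic| u_ext_rule) => `(tactic| u_sse_rule)

/-- Clear the opaque values the SSE rules introduced (`x1`, `cmp1`, `mx1` with its mask fact `hmx1`) that nothing mentions
any more: a vector register that was overwritten, an MXCSR value that was replaced, flags that were rewritten. -/
macro "u_sse_tidy" : tactic => `(tactic| u_clear_stale [x1, cmp1, mx1, hmx1])

macro_rules
  | `(tactic| u_ext_tidy) => `(tactic| u_sse_tidy)
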